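-- pv_equiv track=rewrite | github.com/qja1998/SSAFY_algorithm_study | BOJ/Silver/1697. 숨바꼭질/jyh.py | make_team
-- ===== SOURCE A (Python) =====
-- def make_team(index_list, n):
--     if n == 1:
--         return [[i] for i in index_list]
--     result = []
--     for i in range(len(index_list) - 1):
--         for j in make_team(index_list[i + 1:], n - 1):
--             result.append([index_list[i]] + j)
--     return result
-- ===== SOURCE B (Python) =====
-- def make_team(index_list, n):
--     # Bottom-up DP table: rows[k] holds all k-combinations (lexicographic) of the
--     # suffix processed so far; one right-to-left pass, no recursion, no slicing.
--     if n < 1 or n > len(index_list):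
--         return []
--     rows = [[[]]] + [[] for _ in range(n)]
--     for x in reversed(index_list):
--         rows = [rows[0]] + [[[x] + c for c in rows[k - 1]] + rows[k]
--                             for k in range(1, n + 1)]
--     return rows[n]
-- ===== Notes on version B (the rewrite author's own statement) =====
-- stated objective: alternative
-- what changed: Replaced A's recursion over slices (pick a first element, recurse on the suffix) by a single right-to-left dynamic-programming pass that maintains a table rows[0..n] of all k-combinations of the processed suffix.
import Mathlib
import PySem

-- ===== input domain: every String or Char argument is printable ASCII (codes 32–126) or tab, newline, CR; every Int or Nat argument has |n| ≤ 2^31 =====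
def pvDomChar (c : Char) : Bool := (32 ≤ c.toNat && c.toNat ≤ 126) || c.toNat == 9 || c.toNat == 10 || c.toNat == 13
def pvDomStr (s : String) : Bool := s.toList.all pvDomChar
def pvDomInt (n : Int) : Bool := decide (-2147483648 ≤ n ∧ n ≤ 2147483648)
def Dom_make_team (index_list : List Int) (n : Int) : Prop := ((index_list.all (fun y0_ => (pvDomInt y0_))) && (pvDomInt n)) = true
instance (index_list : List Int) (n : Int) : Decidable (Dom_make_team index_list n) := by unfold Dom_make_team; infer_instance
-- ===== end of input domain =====

-- B replaces A's pick-first-element recursion over list slices by one right-to-left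
-- dynamic-programming pass maintaining a table rows[0..n] of all k-combinations
-- of the suffix processed so far (objective: alternative algorithm, same output).

-- ===== PORT A =====
-- literal port of A: 'if n == 1: …' then 'for i in range(len-1): for j in
-- make_team(index_list[i+1:], n-1): result.append([index_list[i]] + j)'.
-- index_list[i] is in range for every i produced by the loop, so pyGetD is exact here.
def make_team (index_list : List Int) (n : Int) : List (List Int) :=
  if n = 1 then index_list.map (fun i => [i])
  else
    (PySem.List.pyRange 0 ((index_list.length : Int) - 1) 1).attach.foldl
      (fun result i =>
        result ++ (make_team (PySem.List.slice index_list (some (i.1 + 1)) none) (n - 1)).map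
          (fun j => [PySem.List.pyGetD index_list i.1 0] ++ j))
      []
termination_by index_list.length
decreasing_by
  have h := PySem.List.mem_pyRange_one.mp i.2
  rw [PySem.List.slice_from index_list (show (0:Int) ≤ i.1 + 1 by omega)]
  simp only [List.length_drop]
  omega

-- ===== PORT B =====
-- inner comprehension 'rows = [rows[0]] + [[[x]+c for c in rows[k-1]] + rows[k] for k in range(1,n+1)]'
-- as structural recursion over the (rows[k-1], rows[k]) pairs of the table:
def mtStepAux (x : Int) : List (List Int) → List (List (List Int)) → List (List (List Int))
  | _, [] => []
  | prev, cur :: rest => (prev.map (fun c => x :: c) ++ cur) :: mtStepAux x cur rest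

def mtStep (x : Int) (rows : List (List (List Int))) : List (List (List Int)) :=
  match rows with
  | [] => []
  | r0 :: rest => r0 :: mtStepAux x r0 rest

-- literal port of Source B: guard, initial table [[[]]] + n empty rows, one pass over
-- reversed(index_list), then rows[n] (in range under the guard, so getD is exact).
def make_team_alt (index_list : List Int) (n : Int) : List (List Int) :=
  if n < 1 ∨ n > (index_list.length : Int) then []
  else
    let rows := index_list.reverse.foldl (fun rows x => mtStep x rows)
      (([[]] : List (List Int)) :: List.replicate n.toNat [])
    (PySem.List.pyGet? rows n).getD []

-- ===== PRECONDITION & SPEC =====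
def Spec_make_team (index_list : List Int) (n : Int) (out : List (List Int)) : Prop := out = make_team_alt index_list n
instance (index_list : List Int) (n : Int) (out : List (List Int)) : Decidable (Spec_make_team index_list n out) := by unfold Spec_make_team; infer_instance

-- ===== CLAIM (what is proved, stated in full; the proofs are below) =====
def Claim_equal_make_team : Prop := ∀ (index_list : List Int) (n : Int), Dom_make_team index_list n → Spec_make_team index_list n (make_team index_list n)

-- ===== LEMMAS AND PROOFS =====

-- the mathematical combination list both programs compute
def combos : List Int → Nat → List (List Int)
  | _, 0 => [[]]
  | [], _+1 => []
  | x :: s, k+1 => (combos s k).map (fun c => x :: c) ++ combos s (k+1)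

lemma A_eq (lst : List Int) (n : Int) (h : n ≠ 1) :
    make_team lst n = (List.range (lst.length - 1)).flatMap
      (fun k => (make_team (lst.drop (k+1)) (n-1)).map (fun j => lst.getD k 0 :: j)) := by
  rw [make_team, if_neg h,
    List.foldl_attach (f := fun result i => result ++
      (make_team (PySem.List.slice lst (some (i + 1)) none) (n - 1)).map
        (fun j => [PySem.List.pyGetD lst i 0] ++ j)),
    PySem.List.foldl_append_eq_flatMap,
    List.nil_append, PySem.List.pyRange_one,
    show ((lst.length : Int) - 1 - 0).toNat = lst.length - 1 by omega, List.flatMap_map]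
  congr 1
  funext k
  rw [show (0:Int) + (k:Int) + 1 = ((k+1 : Nat) : Int) by omega,
    PySem.List.slice_from_natCast,
    show (0:Int) + (k:Int) = ((k : Nat) : Int) by omega,
    PySem.List.pyGetD_natCast]
  simp

lemma A_nil (n : Int) : make_team ([] : List Int) n = [] := by
  by_cases h : n = 1
  · subst h; rw [make_team, if_pos rfl]; simp
  · rw [A_eq _ _ h]; simp

lemma A_cons (x : Int) (rest : List Int) (n : Int) (h : n ≠ 1) :
    make_team (x :: rest) n
      = (make_team rest (n-1)).map (fun j => x :: j) ++ make_team rest n := by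
  rw [A_eq _ _ h, A_eq rest n h]
  cases rest with
  | nil => simp [A_nil]
  | cons y ys =>
    simp only [List.length_cons, Nat.add_sub_cancel]
    rw [List.range_succ_eq_map, List.flatMap_cons, List.flatMap_map]
    simp

lemma A_nonpos (lst : List Int) : ∀ n : Int, n ≤ 0 → make_team lst n = [] := by
  induction lst with
  | nil => intro n _; exact A_nil n
  | cons x rest ih =>
    intro n hn
    rw [A_cons x rest n (by omega), ih (n-1) (by omega), ih n hn]
    simp

lemma combos_one (s : List Int) : combos s 1 = s.map (fun i => [i]) := by
  induction s with
  | nil => rfl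
  | cons x rest ih => simp [combos, ih]

lemma combos_big (s : List Int) : ∀ k : Nat, s.length < k → combos s k = [] := by
  induction s with
  | nil => intro k hk; cases k with | zero => omega | succ k' => rfl
  | cons x rest ih =>
    intro k hk
    cases k with
    | zero => omega
    | succ k' =>
      simp only [combos]
      rw [ih k' (by simp at hk; omega), ih (k'+1) (by simp at hk; omega)]
      simp

lemma A_eq_combos (lst : List Int) : ∀ n : Int, 1 ≤ n → make_team lst n = combos lst n.toNat := by
  induction lst with
  | nil =>
    intro n hn
    rw [A_nil]
    obtain ⟨m, hm⟩ : ∃ m : Nat, n.toNat = m + 1 := ⟨n.toNat - 1, by omega⟩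
    rw [hm]; rfl
  | cons x rest ih =>
    intro n hn
    by_cases h1 : n = 1
    · subst h1
      rw [make_team, if_pos rfl]
      have : (1:Int).toNat = 1 := rfl
      rw [this, combos_one]
    · have h2 : 2 ≤ n := by omega
      rw [A_cons x rest n h1, ih (n-1) (by omega), ih n (by omega)]
      have : n.toNat = (n-1).toNat + 1 := by omega
      rw [this]
      rfl

lemma combos_zero (s : List Int) : combos s 0 = [[]] := by
  cases s <;> rfl

lemma stepAux_chain (x : Int) (s : List Int) :
    ∀ (m j : Nat), mtStepAux x (combos s j) ((List.range' (j+1) m).map (combos s))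
      = (List.range' (j+1) m).map (combos (x::s)) := by
  intro m
  induction m with
  | zero => intro j; rfl
  | succ m ih =>
    intro j
    rw [List.range'_succ]
    simp only [List.map_cons, mtStepAux]
    rw [ih (j+1)]
    rfl

lemma step_table (x : Int) (s : List Int) (m : Nat) :
    mtStep x ((List.range' 0 (m+1)).map (combos s)) = (List.range' 0 (m+1)).map (combos (x::s)) := by
  rw [List.range'_succ]
  simp only [List.map_cons, mtStep]
  rw [stepAux_chain x s m 0, combos_zero, combos_zero]

lemma replicate_eq (m : Nat) : ∀ j : Nat,
    (List.range' (j+1) m).map (combos ([] : List Int)) = List.replicate m ([] : List (List Int)) := by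
  induction m with
  | zero => intro j; rfl
  | succ m ih =>
    intro j
    rw [List.range'_succ]
    simp only [List.map_cons, List.replicate_succ]
    exact congrArg _ (ih (j+1))

lemma init_eq (m : Nat) :
    ([[]] : List (List Int)) :: List.replicate m ([] : List (List Int))
      = (List.range' 0 (m+1)).map (combos ([] : List Int)) := by
  rw [List.range'_succ]
  simp only [List.map_cons]
  rw [← replicate_eq m 0]
  rfl

lemma fold_table (lst : List Int) (m : Nat) :
    lst.reverse.foldl (fun rows x => mtStep x rows) ((List.range' 0 (m+1)).map (combos ([] : List Int)))
      = (List.range' 0 (m+1)).map (combos lst) := by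
  rw [List.foldl_reverse]
  induction lst with
  | nil => rfl
  | cons x rest ih =>
    simp only [List.foldr_cons]
    rw [ih, step_table]

-- ===== VERDICT (by name: the statement is the Claim_ definition above) =====
theorem make_team_spec : Claim_equal_make_team := by
  intro lst n _
  unfold Spec_make_team make_team_alt
  by_cases hn : n ≤ 0
  · rw [if_pos (Or.inl (by omega)), A_nonpos lst n hn]
  · have h1 : 1 ≤ n := by omega
    by_cases hlen : n > (lst.length : Int)
    · rw [if_pos (Or.inr hlen), A_eq_combos lst n h1]
      exact combos_big lst n.toNat (by omega)
    · rw [if_neg (by omega), A_eq_combos lst n h1]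
      show _ = (PySem.List.pyGet? (lst.reverse.foldl _ _) n).getD []
      rw [init_eq n.toNat, fold_table lst n.toNat]
      have hcast : n = ((n.toNat : Nat) : Int) := by omega
      rw [hcast, PySem.List.pyGet?_natCast,
        List.getElem?_map, List.getElem?_range' (by omega), Option.map_some, Option.getD_some]
      congr 1
      omega
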